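-- pv_equiv track=rewrite | github.com/logic-and-learning-lab/Popper | popper/bkcons.py | has_unordered_vars
-- ===== SOURCE A (Python) =====
-- def has_unordered_vars(xs, ys):
--     lookup = {}
--     def tmp(vs, next_var):
--         out = []
--         for v in vs:
--             if v not in lookup:
--                 lookup[v] = next_var
--                 next_var+=1
--             k = lookup[v]
--             out.append(chr(ord('A') + k))
--         return tuple(out), next_var
--     var_count = 0
--     out_xs, var_count = tmp(xs, var_count)
--     out_ys, var_count = tmp(ys, var_count)
--     z1 = tuple(sorted([xs, ys]))
--     z2 = tuple(sorted([out_xs, out_ys]))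
--     return z1 != z2
-- ===== SOURCE B (Python) =====
-- def has_unordered_vars(xs, ys):
--     # Fixed-point test: (xs, ys) is fine iff the stream xs+ys is its own
--     # first-occurrence canonical renaming (identity case), or renames exactly
--     # onto the swapped stream ys+xs (swap case).  One fused pass, two flags,
--     # no renamed tuples are built and nothing is sorted.
--     seq = tuple(xs) + tuple(ys)
--     swapped = tuple(ys) + tuple(xs)
--     same_ok = True
--     swap_ok = len(xs) == len(ys)
--     lab = {}
--     for i, v in enumerate(seq):
--         if v not in lab:
--             lab[v] = chr(ord('A') + len(lab))
--         r = lab[v]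
--         same_ok = same_ok and r == v
--         swap_ok = swap_ok and r == swapped[i]
--     return not (same_ok or swap_ok)
-- ===== Notes on version B (the rewrite author's own statement) =====
-- stated objective: alternative
-- what changed: Replaces A's rename-then-compare pipeline (helper threading a next_var accumulator to build two renamed tuples, then sorting the two pairs and comparing) with a single fused streaming pass that never builds the renamed tuples: it walks xs+ys once keeping two boolean flags, testing at each position whether the canonical label is a fixed point (equals the variable itself) or matches the swapped stream ys+xs, and returns the negated disjunction of the flags.
import Mathlib
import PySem

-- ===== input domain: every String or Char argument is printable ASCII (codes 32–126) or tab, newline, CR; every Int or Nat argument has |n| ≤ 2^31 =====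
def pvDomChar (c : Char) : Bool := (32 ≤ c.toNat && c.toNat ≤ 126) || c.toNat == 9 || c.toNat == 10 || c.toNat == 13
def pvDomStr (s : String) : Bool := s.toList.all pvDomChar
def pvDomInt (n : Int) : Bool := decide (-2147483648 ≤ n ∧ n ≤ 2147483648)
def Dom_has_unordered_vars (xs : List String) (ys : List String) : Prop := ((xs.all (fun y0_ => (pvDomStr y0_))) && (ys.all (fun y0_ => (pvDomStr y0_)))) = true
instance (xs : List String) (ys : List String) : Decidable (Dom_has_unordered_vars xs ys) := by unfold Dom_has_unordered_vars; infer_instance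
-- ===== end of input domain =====

-- B replaces A's rename-then-sort-then-compare pipeline by a single fused streaming pass over
-- xs+ys that keeps two boolean flags (canonical label is a fixed point / matches the swapped
-- stream ys+xs) and never builds the renamed tuples or sorts anything.

-- chr(ord('A') + k): one-character string (k is a nonnegative first-occurrence index here)
def pvChr (k : Int) : String := (Char.ofNat ('A'.toNat + k.toNat)).toString

-- ===== PORT A =====
-- the inner helper tmp(vs, next_var), with the shared dict lookup threaded explicitly
def pvTmpA : List String → PySem.Dict String Int → Int → (List String × PySem.Dict String Int × Int)
  | [], lookup, next_var => ([], lookup, next_var)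
  | v :: vs, lookup, next_var =>
    let st := if lookup.contains v then (lookup, next_var) else (lookup.insert v next_var, next_var + 1)
    let k := (st.1.get? v).getD 0   -- lookup[v]: the key is always present here, so KeyError is impossible
    let r := pvTmpA vs st.1 st.2
    (pvChr k :: r.1, r.2)

def has_unordered_vars (xs : List String) (ys : List String) : Bool :=
  let r1 := pvTmpA xs PySem.Dict.empty 0
  let r2 := pvTmpA ys r1.2.1 r1.2.2
  let z1 := PySem.List.sorted [xs, ys] (fun x => x)
  let z2 := PySem.List.sorted [r1.1, r2.1] (fun x => x)
  decide (z1 ≠ z2)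

-- ===== PORT B =====
-- the for-loop of Source B: state is (lab, same_ok, swap_ok), iterating over enumerate(seq)
def pvScanB (swapped : List String) : List (Int × String) → PySem.Dict String String → Bool → Bool → Bool × Bool
  | [], _, same_ok, swap_ok => (same_ok, swap_ok)
  | (i, v) :: rest, lab, same_ok, swap_ok =>
    let lab := if lab.contains v then lab else lab.insert v (pvChr (PySem.Dict.size lab))
    let r := lab.getD v ""   -- lab[v]: the key is always present here
    let same_ok := same_ok && (r == v)
    let swap_ok := swap_ok && (r == (PySem.List.pyGet? swapped i).getD "")  -- swapped[i]: always in range (|swapped| = |seq|)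
    pvScanB swapped rest lab same_ok swap_ok

def has_unordered_vars_alt (xs : List String) (ys : List String) : Bool :=
  let seq := xs ++ ys
  let swapped := ys ++ xs
  let res := pvScanB swapped (PySem.List.enumerate seq 0) PySem.Dict.empty true (decide (xs.length = ys.length))
  !(res.1 || res.2)

-- ===== PRECONDITION & SPEC =====
def Spec_has_unordered_vars (xs : List String) (ys : List String) (out : Bool) : Prop := out = has_unordered_vars_alt xs ys
instance (xs : List String) (ys : List String) (out : Bool) : Decidable (Spec_has_unordered_vars xs ys out) := by unfold Spec_has_unordered_vars; infer_instance

-- ===== CLAIM (what is proved, stated in full; the proofs are below) =====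
def Claim_equal_has_unordered_vars : Prop := ∀ (xs : List String) (ys : List String), Dom_has_unordered_vars xs ys → Spec_has_unordered_vars xs ys (has_unordered_vars xs ys)

-- ===== LEMMAS AND PROOFS =====

-- the items list of a dict enumerating D from index n (A-side, Int values)
def pvEd : List String → Int → List (String × Int)
  | [], _ => []
  | v :: D, n => (v, n) :: pvEd D (n + 1)

theorem pvEd_append (a b : List String) (n : Int) :
    pvEd (a ++ b) n = pvEd a n ++ pvEd b (n + a.length) := by
  induction a generalizing n with
  | nil => simp [pvEd]
  | cons x t ih => simp [pvEd, ih, add_assoc]; ring_nf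

theorem pv_get?_mk_ed_of_mem {v : String} {D : List String} (h : v ∈ D) (n : Int) :
    (PySem.Dict.mk (pvEd D n)).get? v = some (n + (List.idxOf v D : Int)) := by
  induction D generalizing n with
  | nil => simp at h
  | cons x t ih =>
    by_cases hx : x = v
    · subst hx
      simp [pvEd, PySem.Dict.get?_mk_cons, List.idxOf_cons_self]
    · have hv : v ∈ t := by
        rcases List.mem_cons.mp h with h1 | h1
        · exact absurd h1.symm hx
        · exact h1
      have : (x == v) = false := by simpa using hx
      simp [pvEd, PySem.Dict.get?_mk_cons, this, ih hv, List.idxOf_cons_ne _ hx]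
      ring

theorem pv_get?_mk_ed_of_not_mem {v : String} {D : List String} (h : v ∉ D) (n : Int) :
    (PySem.Dict.mk (pvEd D n)).get? v = none := by
  induction D generalizing n with
  | nil => simp [pvEd, PySem.Dict.get?]
  | cons x t ih =>
    have hx : (x == v) = false := by simpa using fun e => h (by simp [e])
    simp at h
    simp [pvEd, PySem.Dict.get?_mk_cons, hx, ih h.2]

theorem pv_contains_mk_ed (v : String) (D : List String) (n : Int) :
    (PySem.Dict.mk (pvEd D n)).contains v = decide (v ∈ D) := by
  rw [PySem.Dict.contains_eq_isSome_get?]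
  by_cases h : v ∈ D
  · simp [pv_get?_mk_ed_of_mem h, h]
  · simp [pv_get?_mk_ed_of_not_mem h, h]

theorem pv_add_of_mem {s : List String} {x : String} (h : x ∈ s) : PySem.Set.add s x = s := by
  simp [PySem.Set.add, PySem.Set.contains, h]

theorem pv_add_of_not_mem {s : List String} {x : String} (h : x ∉ s) : PySem.Set.add s x = s ++ [x] := by
  simp [PySem.Set.add, PySem.Set.contains, h]

theorem pv_update_append_exists (l : List String) (s : List String) :
    ∃ r, PySem.Set.update s l = s ++ r := by
  induction l generalizing s with
  | nil => exact ⟨[], by simp [PySem.Set.update]⟩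
  | cons x t ih =>
    have hstep : PySem.Set.update s (x :: t) = PySem.Set.update (PySem.Set.add s x) t := rfl
    by_cases hx : x ∈ s
    · rw [hstep, pv_add_of_mem hx]; exact ih s
    · rw [hstep, pv_add_of_not_mem hx]
      obtain ⟨r, hr⟩ := ih (s ++ [x])
      exact ⟨[x] ++ r, by simp [hr]⟩

theorem pv_idxOf_update_of_mem {v : String} {s : List String} (h : v ∈ s) (l : List String) :
    List.idxOf v (PySem.Set.update s l) = List.idxOf v s := by
  obtain ⟨r, hr⟩ := pv_update_append_exists l s
  rw [hr]
  exact List.idxOf_append_of_mem h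

theorem pv_mem_update_of_mem {v : String} {s : List String} (h : v ∈ s) (l : List String) :
    v ∈ PySem.Set.update s l := by
  obtain ⟨r, hr⟩ := pv_update_append_exists l s
  rw [hr]; exact List.mem_append_left _ h

theorem pv_nodup_add {s : List String} (h : s.Nodup) (x : String) : (PySem.Set.add s x).Nodup := by
  by_cases hx : x ∈ s
  · rw [pv_add_of_mem hx]; exact h
  · rw [pv_add_of_not_mem hx]
    simp [List.nodup_append, h]
    exact fun a ha e => hx (e ▸ ha)

theorem pv_nodup_update {s : List String} (h : s.Nodup) (l : List String) :
    (PySem.Set.update s l).Nodup := by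
  induction l generalizing s with
  | nil => simpa [PySem.Set.update]
  | cons x t ih => exact ih (pv_nodup_add h x)

theorem pv_mem_list_update (l : List String) : ∀ (s : List String) (v : String), v ∈ l → v ∈ PySem.Set.update s l := by
  induction l with
  | nil => intro s v hv; simp at hv
  | cons x t ih =>
    intro s v hv
    rcases List.mem_cons.mp hv with rfl | hv
    · have hx : v ∈ PySem.Set.add s v := by
        by_cases hc : v ∈ s
        · rw [pv_add_of_mem hc]; exact hc
        · rw [pv_add_of_not_mem hc]; simp
      exact pv_mem_update_of_mem hx t
    · exact ih (PySem.Set.add s x) v hv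

-- the invariant of A's helper: with the dict enumerating the nodup seen-list s and next_var = |s|,
-- tmp renames by first-occurrence index and extends s to Set.update s vs
theorem pvTmpA_spec (vs : List String) (s : List String) (hs : s.Nodup) :
    pvTmpA vs (PySem.Dict.mk (pvEd s 0)) (s.length : Int)
      = (vs.map (fun v => pvChr (List.idxOf v (PySem.Set.update s vs) : Int)),
         PySem.Dict.mk (pvEd (PySem.Set.update s vs) 0),
         ((PySem.Set.update s vs).length : Int)) := by
  induction vs generalizing s with
  | nil => simp [pvTmpA, PySem.Set.update]
  | cons v vs ih =>
    have hupd : PySem.Set.update s (v :: vs) = PySem.Set.update (PySem.Set.add s v) vs := rfl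
    by_cases hv : v ∈ s
    · have hadd : PySem.Set.add s v = s := pv_add_of_mem hv
      have hcont : (PySem.Dict.mk (pvEd s 0)).contains v = true := by
        rw [pv_contains_mk_ed]; simp [hv]
      have hk : ((PySem.Dict.mk (pvEd s 0)).get? v).getD 0 = (List.idxOf v s : Int) := by
        simp [pv_get?_mk_ed_of_mem hv]
      have hidx : List.idxOf v (PySem.Set.update s (v :: vs)) = List.idxOf v s := by
        rw [hupd, hadd]; exact pv_idxOf_update_of_mem hv vs
      simp only [pvTmpA, hcont, if_true]
      rw [hupd, hadd] at *
      simp [hk, ih s hs, hidx]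
    · have hcont : (PySem.Dict.mk (pvEd s 0)).contains v = false := by
        rw [pv_contains_mk_ed]; simp [hv]
      have hins : (PySem.Dict.mk (pvEd s 0)).insert v (s.length : Int)
          = PySem.Dict.mk (pvEd (s ++ [v]) 0) := by
        apply PySem.Dict.ext
        rw [PySem.Dict.items_insert_of_not_contains _ _ hcont]
        simp [pvEd_append, pvEd]
      have hadd : PySem.Set.add s v = s ++ [v] := pv_add_of_not_mem hv
      have hnd : (s ++ [v]).Nodup := by
        simp [List.nodup_append, hs]
        exact fun a ha e => hv (e ▸ ha)
      have hk : ((PySem.Dict.mk (pvEd (s ++ [v]) 0)).get? v).getD 0 = (s.length : Int) := by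
        have hm : v ∈ s ++ [v] := by simp
        rw [pv_get?_mk_ed_of_mem hm]
        have : List.idxOf v (s ++ [v]) = s.length := by
          rw [List.idxOf_append]
          simp [hv]
        simp [this]
      have hidx : List.idxOf v (PySem.Set.update s (v :: vs)) = s.length := by
        rw [hupd, hadd, pv_idxOf_update_of_mem (by simp : v ∈ s ++ [v]) vs,
          List.idxOf_append]
        simp [hv]
      have hlen : ((s ++ [v]).length : Int) = (s.length : Int) + 1 := by simp
      simp only [pvTmpA, hcont, Bool.false_eq_true, if_false]
      rw [hupd, hadd] at *
      simp only [hins, hk]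
      rw [← hlen, ih (s ++ [v]) hnd]
      simp [hidx]

-- B-side: the items list of the label dict enumerating D from index n (String values)
def pvLab : List String → Nat → List (String × String)
  | [], _ => []
  | v :: D, n => (v, pvChr (n : Int)) :: pvLab D (n + 1)

theorem pvLab_append (a b : List String) (n : Nat) :
    pvLab (a ++ b) n = pvLab a n ++ pvLab b (n + a.length) := by
  induction a generalizing n with
  | nil => simp [pvLab]
  | cons x t ih =>
    simp [pvLab, ih]
    congr 1
    omega

theorem pvLab_length (D : List String) (n : Nat) : (pvLab D n).length = D.length := by
  induction D generalizing n with
  | nil => rfl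
  | cons x t ih => simp [pvLab, ih]

theorem pv_get?_mk_lab_of_mem {v : String} {D : List String} (h : v ∈ D) (n : Nat) :
    (PySem.Dict.mk (pvLab D n)).get? v = some (pvChr ((n + List.idxOf v D : Nat) : Int)) := by
  induction D generalizing n with
  | nil => simp at h
  | cons x t ih =>
    by_cases hx : x = v
    · subst hx
      simp [pvLab, PySem.Dict.get?_mk_cons, List.idxOf_cons_self]
    · have hv : v ∈ t := by
        rcases List.mem_cons.mp h with h1 | h1
        · exact absurd h1.symm hx
        · exact h1
      have hbeq : (x == v) = false := by simpa using hx
      rw [show List.idxOf v (x :: t) = List.idxOf v t + 1 from List.idxOf_cons_ne _ hx,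
        show n + (List.idxOf v t + 1) = (n + 1) + List.idxOf v t from by omega]
      simp [pvLab, PySem.Dict.get?_mk_cons, hbeq, ih hv]

theorem pv_get?_mk_lab_of_not_mem {v : String} {D : List String} (h : v ∉ D) (n : Nat) :
    (PySem.Dict.mk (pvLab D n)).get? v = none := by
  induction D generalizing n with
  | nil => simp [pvLab, PySem.Dict.get?]
  | cons x t ih =>
    have hx : (x == v) = false := by simpa using fun e => h (by simp [e])
    simp at h
    simp [pvLab, PySem.Dict.get?_mk_cons, hx, ih h.2]

theorem pv_contains_mk_lab (v : String) (D : List String) (n : Nat) :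
    (PySem.Dict.mk (pvLab D n)).contains v = decide (v ∈ D) := by
  rw [PySem.Dict.contains_eq_isSome_get?]
  by_cases h : v ∈ D
  · simp [pv_get?_mk_lab_of_mem h, h]
  · simp [pv_get?_mk_lab_of_not_mem h, h]

-- the invariant of B's loop: with lab labelling the nodup seen-list s, the scan computes the
-- two flags pointwise against first-occurrence indices in the final dedup order
theorem pvScanB_spec (rest : List String) : ∀ (s : List String), s.Nodup →
    ∀ (same swap : Bool) (swapped : List String) (i : Int),
    pvScanB swapped (PySem.List.enumerate rest i) (PySem.Dict.mk (pvLab s 0)) same swap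
      = (same && rest.all (fun v => pvChr (List.idxOf v (PySem.Set.update s rest) : Int) == v),
         swap && (PySem.List.enumerate rest i).all
           (fun p => pvChr (List.idxOf p.2 (PySem.Set.update s rest) : Int) == (PySem.List.pyGet? swapped p.1).getD "")) := by
  induction rest with
  | nil => intro s _ same swap swapped i; simp [PySem.List.enumerate, pvScanB, PySem.Set.update]
  | cons v rest ih =>
    intro s hs same swap swapped i
    have hupd : PySem.Set.update s (v :: rest) = PySem.Set.update (PySem.Set.add s v) rest := rfl
    rw [PySem.List.enumerate_cons]
    by_cases hv : v ∈ s
    · have hadd : PySem.Set.add s v = s := pv_add_of_mem hv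
      have hcont : (PySem.Dict.mk (pvLab s 0)).contains v = true := by
        rw [pv_contains_mk_lab]; simp [hv]
      have hr : (PySem.Dict.mk (pvLab s 0)).getD v "" = pvChr (List.idxOf v s : Int) := by
        rw [PySem.Dict.getD_eq_get?_getD, pv_get?_mk_lab_of_mem hv]
        simp
      have hidx : List.idxOf v (PySem.Set.update s (v :: rest)) = List.idxOf v s := by
        rw [hupd, hadd]; exact pv_idxOf_update_of_mem hv rest
      simp only [pvScanB, hcont, if_true, hr]
      rw [hupd, hadd, ih s hs]
      rw [hupd, hadd] at hidx
      simp [List.all_cons, hidx, Bool.and_assoc]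
    · have hcont : (PySem.Dict.mk (pvLab s 0)).contains v = false := by
        rw [pv_contains_mk_lab]; simp [hv]
      have hsize : PySem.Dict.size (PySem.Dict.mk (pvLab s 0)) = (s.length : Int) := by
        simp [PySem.Dict.size, pvLab_length]
      have hins : (PySem.Dict.mk (pvLab s 0)).insert v (pvChr (s.length : Int))
          = PySem.Dict.mk (pvLab (s ++ [v]) 0) := by
        apply PySem.Dict.ext
        rw [PySem.Dict.items_insert_of_not_contains _ _ hcont]
        simp [pvLab_append, pvLab]
      have hadd : PySem.Set.add s v = s ++ [v] := pv_add_of_not_mem hv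
      have hnd : (s ++ [v]).Nodup := by
        simp [List.nodup_append, hs]
        exact fun a ha e => hv (e ▸ ha)
      have hidxs : List.idxOf v (s ++ [v]) = s.length := by
        rw [List.idxOf_append]; simp [hv]
      have hr : (PySem.Dict.mk (pvLab (s ++ [v]) 0)).getD v "" = pvChr (s.length : Int) := by
        rw [PySem.Dict.getD_eq_get?_getD, pv_get?_mk_lab_of_mem (by simp : v ∈ s ++ [v])]
        simp [hidxs]
      have hidx : List.idxOf v (PySem.Set.update s (v :: rest)) = s.length := by
        rw [hupd, hadd, pv_idxOf_update_of_mem (by simp : v ∈ s ++ [v]) rest, hidxs]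
      simp only [pvScanB, hcont, Bool.false_eq_true, if_false, hsize, hins, hr]
      rw [hupd, hadd, ih (s ++ [v]) hnd]
      rw [hupd, hadd] at hidx
      simp [List.all_cons, hidx, Bool.and_assoc]

-- the identity flag is "the stream maps to itself"
theorem pv_all_self_eq (g : String → String) (l : List String) :
    (l.all (fun v => g v == v)) = decide (l.map g = l) := by
  induction l with
  | nil => simp
  | cons x t ih =>
    rw [List.all_cons, ih]
    by_cases h : g x = x
    · simp [h]
    · simp [h]

-- the swap flag is "the stream maps to swapped" (indices always in range when lengths line up)
theorem pv_all_swap_eq (g : String → String) (a : List String) :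
    ∀ (swapped : List String) (i : Nat), swapped.length = i + a.length →
    ((PySem.List.enumerate a (i : Int)).all
        (fun p => g p.2 == (PySem.List.pyGet? swapped p.1).getD ""))
      = decide (a.map g = swapped.drop i) := by
  induction a with
  | nil =>
    intro swapped i h
    have hd : List.drop i swapped = [] := List.drop_of_length_le (by simp at h; omega)
    simp [PySem.List.enumerate, hd]
  | cons v t ih =>
    intro swapped i h
    have hi : i < swapped.length := by simp at h; omega
    have hget : (PySem.List.pyGet? swapped (i : Int)).getD "" = swapped[i] := by
      simp [PySem.List.pyGet?_natCast, List.getElem?_eq_getElem hi]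
    have hdrop : swapped.drop i = swapped[i] :: swapped.drop (i + 1) :=
      List.drop_eq_getElem_cons hi
    have hcast : (i : Int) + 1 = ((i + 1 : Nat) : Int) := by push_cast; ring
    rw [PySem.List.enumerate_cons, List.all_cons, hget, hcast,
      ih swapped (i + 1) (by simp at h ⊢; omega)]
    by_cases h1 : g v = swapped[i]
    · rw [hdrop, h1]
      simp only [List.map_cons, h1, beq_self_eq_true, Bool.true_and,
        List.cons_eq_cons, true_and]
    · rw [hdrop]
      have hb : (g v == swapped[i]) = false := by simpa using h1
      rw [hb, Bool.false_and]
      symm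
      rw [decide_eq_false_iff_not]
      intro e
      rw [List.map_cons] at e
      exact h1 (List.cons_eq_cons.mp e).1

theorem pv_perm_pair_iff (a b c d : List String) :
    [a, b].Perm [c, d] ↔ (a = c ∧ b = d) ∨ (a = d ∧ b = c) := by
  constructor
  · intro h
    by_cases hac : a = c
    · subst hac; left; refine ⟨rfl, ?_⟩
      simpa using ((List.perm_cons a).mp h).mem_iff.mp (by simp : b ∈ [b])
    · have had : a = d := by
        rcases List.mem_pair.mp (h.mem_iff.mp (by simp : a ∈ [a, b])) with h1 | h1
        · exact absurd h1 hac
        · exact h1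
      subst had
      right; refine ⟨rfl, ?_⟩
      have h2 : [a, b].Perm [a, c] := h.trans (List.Perm.swap ..)
      simpa using ((List.perm_cons a).mp h2).mem_iff.mp (by simp : b ∈ [b])
  · rintro (⟨rfl, rfl⟩ | ⟨rfl, rfl⟩)
    · rfl
    · exact List.Perm.swap ..

theorem pv_final (xs ys rx ry : List String) :
    (decide (¬ (PySem.List.sorted [xs, ys] (fun x => x) = PySem.List.sorted [rx, ry] (fun x => x))))
      = !(decide ((xs = rx ∧ ys = ry) ∨ (xs = ry ∧ ys = rx))) := by
  have h := (PySem.List.sorted_id_eq_sorted_id_iff_perm [xs, ys] [rx, ry]).trans (pv_perm_pair_iff xs ys rx ry)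
  rw [decide_not]
  refine congrArg (! ·) ?_
  rw [show (fun (a b : List String) => a.decidableLT b)
        = @LinearOrder.toDecidableLT (List String) List.instLinearOrder
      from funext fun a => funext fun b => Subsingleton.elim _ _]
  exact decide_eq_decide.mpr h

-- ===== VERDICT (by name: the statement is the Claim_ definition above) =====
theorem has_unordered_vars_spec : Claim_equal_has_unordered_vars := by
  intro xs ys _
  unfold Spec_has_unordered_vars has_unordered_vars has_unordered_vars_alt
  -- the common renaming order
  set S1 := PySem.Set.update ([] : List String) xs with hS1
  set S2 := PySem.Set.update S1 ys with hS2
  have hx1 : ∀ v ∈ xs, v ∈ S1 := fun v hv => pv_mem_list_update xs [] v hv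
  -- A's side reduced to "xs/ys versus their F-renamings"
  have h1 := pvTmpA_spec xs [] List.nodup_nil
  have hnd1 : S1.Nodup := pv_nodup_update List.nodup_nil xs
  have h2 := pvTmpA_spec ys S1 hnd1
  have hempty : (PySem.Dict.empty : PySem.Dict String Int) = PySem.Dict.mk (pvEd [] 0) := rfl
  have hr1 : pvTmpA xs PySem.Dict.empty 0 =
      (xs.map (fun v => pvChr (List.idxOf v S1 : Int)), PySem.Dict.mk (pvEd S1 0), (S1.length : Int)) := by
    rw [hempty]
    simpa [hS1] using h1
  have hr2 : pvTmpA ys (PySem.Dict.mk (pvEd S1 0)) (S1.length : Int) =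
      (ys.map (fun v => pvChr (List.idxOf v S2 : Int)), PySem.Dict.mk (pvEd S2 0), (S2.length : Int)) := by
    simpa [hS2] using h2
  have hxmap : xs.map (fun v => pvChr (List.idxOf v S1 : Int))
      = xs.map (fun v => pvChr (List.idxOf v S2 : Int)) := by
    apply List.map_congr_left
    intro v hv
    have h : List.idxOf v S2 = List.idxOf v S1 := by
      rw [hS2]; exact pv_idxOf_update_of_mem (hx1 v hv) ys
    simp [h]
  -- B's side: the invariant, then the two flag characterisations
  have hscan := pvScanB_spec (xs ++ ys) [] List.nodup_nil true
      (decide (xs.length = ys.length)) (ys ++ xs) 0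
  have hT : PySem.Set.update ([] : List String) (xs ++ ys) = S2 := by
    rw [hS2, hS1]
    simp [PySem.Set.update, List.foldl_append]
  have hemptyS : (PySem.Dict.empty : PySem.Dict String String) = PySem.Dict.mk (pvLab [] 0) := rfl
  rw [hT] at hscan
  have hsame : ((xs ++ ys).all (fun v => pvChr (List.idxOf v S2 : Int) == v))
      = decide ((xs ++ ys).map (fun v => pvChr (List.idxOf v S2 : Int)) = xs ++ ys) :=
    pv_all_self_eq (fun v => pvChr (List.idxOf v S2 : Int)) (xs ++ ys)
  have hswap : ((PySem.List.enumerate (xs ++ ys) (0 : Int)).all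
        (fun p => pvChr (List.idxOf p.2 S2 : Int) == (PySem.List.pyGet? (ys ++ xs) p.1).getD ""))
      = decide ((xs ++ ys).map (fun v => pvChr (List.idxOf v S2 : Int)) = ys ++ xs) := by
    have h := pv_all_swap_eq (fun v => pvChr (List.idxOf v S2 : Int)) (xs ++ ys) (ys ++ xs) 0
      (by simp; omega)
    simpa using h
  -- the two prop-level bridges
  have hb1 : (xs = xs.map (fun v => pvChr (List.idxOf v S2 : Int)) ∧ ys = ys.map (fun v => pvChr (List.idxOf v S2 : Int)))
      ↔ (xs ++ ys).map (fun v => pvChr (List.idxOf v S2 : Int)) = xs ++ ys := by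
    constructor
    · rintro ⟨e1, e2⟩; rw [List.map_append, ← e1, ← e2]
    · intro e
      rw [List.map_append] at e
      obtain ⟨e1, e2⟩ := List.append_inj e (by simp)
      exact ⟨e1.symm, e2.symm⟩
  have hb2 : (xs = ys.map (fun v => pvChr (List.idxOf v S2 : Int)) ∧ ys = xs.map (fun v => pvChr (List.idxOf v S2 : Int)))
      ↔ (xs.length = ys.length ∧ (xs ++ ys).map (fun v => pvChr (List.idxOf v S2 : Int)) = ys ++ xs) := by
    constructor
    · rintro ⟨e1, e2⟩
      constructor
      · rw [e1, e2]; simp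
      · rw [List.map_append, ← e1, ← e2]
    · rintro ⟨hl, e⟩
      rw [List.map_append] at e
      obtain ⟨e1, e2⟩ := List.append_inj e (by simp [hl])
      exact ⟨e2.symm, e1.symm⟩
  simp only [hr1, hr2, hxmap, hscan, hemptyS]
  rw [pv_final xs ys (xs.map (fun v => pvChr (List.idxOf v S2 : Int))) (ys.map (fun v => pvChr (List.idxOf v S2 : Int)))]
  simp only [Bool.true_and, hsame, hswap]
  congr 1
  simp [hb1, hb2]
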